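-- pv_equiv track=rewrite | github.com/ANewProfile/python | YoungWonks/level3/YWHW3-2.py | compare_strings
-- ===== SOURCE A (Python) =====
-- def compare_strings(stringa, stringb):
--     final = []
--     done = False
--     for i in range(0, len(stringa)):
--         done = False
--         for j in range(0, len(stringb)):
--             if done:
--                 continue
--
--             if stringa[i] == stringb[j]:
--                 final.append(stringa[i])
--                 stringb = stringb[j:]
--                 done = True
--
--
--     return final
-- ===== SOURCE B (Python) =====
-- def compare_strings(stringa, stringb):
--     # Index b's positions per character once, then for each char of a binary-search
--     # the first occurrence at or after the current pointer.
--     pos = {}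
--     for i, c in enumerate(stringb):
--         pos.setdefault(c, []).append(i)
--     final = []
--     p = 0
--     for c in stringa:
--         lst = pos.get(c, [])
--         lo, hi = 0, len(lst)
--         while lo < hi:
--             mid = (lo + hi) // 2
--             if lst[mid] < p:
--                 lo = mid + 1
--             else:
--                 hi = mid
--         if lo < len(lst):
--             final.append(c)
--             p = lst[lo]
--     return final
-- ===== Notes on version B (the rewrite author's own statement) =====
-- stated objective: faster
-- what changed: Replaces A's nested scan (for each char of a, rescan b from the front with a done-flag and reslice the string) by a per-character index table of b built once plus a hand-written binary search for the first occurrence at or after the current pointer.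
import Mathlib
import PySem

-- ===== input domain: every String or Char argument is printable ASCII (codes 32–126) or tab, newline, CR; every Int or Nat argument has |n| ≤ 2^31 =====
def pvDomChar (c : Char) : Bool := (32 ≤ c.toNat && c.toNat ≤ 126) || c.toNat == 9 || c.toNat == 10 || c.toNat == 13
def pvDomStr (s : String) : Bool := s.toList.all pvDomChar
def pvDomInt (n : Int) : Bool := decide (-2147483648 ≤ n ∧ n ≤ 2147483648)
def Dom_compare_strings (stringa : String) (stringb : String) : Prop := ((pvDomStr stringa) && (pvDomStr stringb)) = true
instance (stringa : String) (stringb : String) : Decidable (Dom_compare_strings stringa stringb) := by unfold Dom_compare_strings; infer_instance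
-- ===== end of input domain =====

-- B replaces A's nested rescans of b (with a done-flag and string reslicing) by a per-character
-- index table of b built once plus a binary search for the first occurrence at or after the
-- current pointer (objective: faster).

-- ===== PORT A =====
-- inner 'for j in range(0, len(stringb))' loop body of A (done-flag, first-match slice)
def compare_strings_inner (stringa : String) (i : Int)
    (t : List String × String × Bool) (j : Int) : List String × String × Bool :=
  if t.2.2 then t
  else
    match PySem.Str.pyGet? stringa i, PySem.Str.pyGet? t.2.1 j with
    | some ca, some cb =>
        if ca = cb then (t.1 ++ [String.singleton ca], PySem.Str.slice t.2.1 (some j) none, true)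
        else t
    | _, _ => t

-- outer 'for i in range(0, len(stringa))' loop body of A
def compare_strings_outer (stringa : String)
    (st : List String × String) (i : Int) : List String × String :=
  let inner := (PySem.List.pyRange 0 (PySem.Str.len st.2) 1).foldl
    (compare_strings_inner stringa i) (st.1, st.2, false)
  (inner.1, inner.2.1)

def compare_strings (stringa : String) (stringb : String) : List String :=
  let res := (PySem.List.pyRange 0 (PySem.Str.len stringa) 1).foldl
    (compare_strings_outer stringa) ([], stringb)
  res.1

-- ===== PORT B =====
-- 'while lo < hi' binary-search loop of B
def bsLoop (lst : List Int) (p : Int) (lo hi : Nat) : Nat :=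
  if lo < hi then
    let mid := (lo + hi) / 2
    if lst.getD mid 0 < p then bsLoop lst p (mid + 1) hi else bsLoop lst p lo mid
  else lo
termination_by hi - lo
decreasing_by all_goals omega

-- 'for c in stringa' loop body of B
def compare_strings_alt_step (pos : PySem.Dict Char (List Int))
    (st : List String × Int) (c : Char) : List String × Int :=
  let lst := pos.getD c []
  let lo := bsLoop lst st.2 0 lst.length
  if lo < lst.length then (st.1 ++ [String.singleton c], lst.getD lo 0) else st

def compare_strings_alt (stringa : String) (stringb : String) : List String :=
  let pos : PySem.Dict Char (List Int) :=
    (PySem.List.enumerate stringb.toList 0).foldl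
      (fun d ic => d.modify ic.2 [] (fun l => l ++ [ic.1])) PySem.Dict.empty
  let res := stringa.toList.foldl (compare_strings_alt_step pos) ([], 0)
  res.1

-- ===== PRECONDITION & SPEC =====
def Spec_compare_strings (stringa : String) (stringb : String) (out : List String) : Prop := out = compare_strings_alt stringa stringb
instance (stringa : String) (stringb : String) (out : List String) : Decidable (Spec_compare_strings stringa stringb out) := by unfold Spec_compare_strings; infer_instance

-- ===== CLAIM (what is proved, stated in full; the proofs are below) =====
def Claim_equal_compare_strings : Prop := ∀ (stringa : String) (stringb : String), Dom_compare_strings stringa stringb → Spec_compare_strings stringa stringb (compare_strings stringa stringb)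

-- ===== LEMMAS AND PROOFS =====

-- common reference function: greedy matching with an absolute pointer p into b
def gspec (b : List Char) : List Char → Nat → List String
  | [], _ => []
  | c :: cs, p =>
    match (b.drop p).findIdx? (fun x => x == c) with
    | none => gspec b cs p
    | some j => String.singleton c :: gspec b cs (p + j)

-- the positions of c in u, as absolute indices starting at offset s
def posA (c : Char) (u : List Char) (s : Int) : List Int :=
  ((PySem.List.enumerate u s).filter (fun ic => ic.2 == c)).map (·.1)

theorem posA_nil (c : Char) (s : Int) : posA c [] s = [] := rfl

theorem posA_cons (c x : Char) (u : List Char) (s : Int) :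
    posA c (x :: u) s = (if x == c then [s] else []) ++ posA c u (s + 1) := by
  simp only [posA, PySem.List.enumerate_cons, List.filter_cons]
  by_cases h : (x == c) <;> simp [h]

theorem mem_posA_bounds (c : Char) (u : List Char) (s : Int) (x : Int)
    (hx : x ∈ posA c u s) : s ≤ x ∧ x < s + u.length := by
  induction u generalizing s with
  | nil => simp [posA_nil] at hx
  | cons y u ih =>
    rw [posA_cons] at hx
    rcases List.mem_append.1 hx with h | h
    · by_cases hy : (y == c) <;> simp [hy] at h
      subst h; constructor <;> simp <;> omega
    · have := ih (s + 1) h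
      constructor <;> simp at this ⊢ <;> omega

theorem head?_posA (c : Char) (u : List Char) (s : Int) :
    (posA c u s).head? = (u.findIdx? (fun x => x == c)).map (fun j => s + (j : Int)) := by
  induction u generalizing s with
  | nil => simp [posA_nil]
  | cons y u ih =>
    rw [posA_cons, List.findIdx?_cons]
    by_cases hy : (y == c)
    · simp [hy]
    · simp only [hy, if_neg, Bool.false_eq_true, not_false_iff, List.nil_append, if_false]
      rw [ih (s + 1)]
      cases u.findIdx? (fun x => x == c) <;> simp <;> ring

theorem pairwise_posA (c : Char) (u : List Char) (s : Int) :
    (posA c u s).Pairwise (· < ·) := by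
  induction u generalizing s with
  | nil => simp [posA_nil]
  | cons y u ih =>
    rw [posA_cons]
    apply List.pairwise_append.2
    refine ⟨?_, ih (s + 1), ?_⟩
    · by_cases hy : (y == c) <;> simp [hy]
    · intro a ha b hb
      have hb' := (mem_posA_bounds c u (s + 1) b hb).1
      by_cases hy : (y == c) <;> simp [hy] at ha
      omega

theorem posA_append (c : Char) (u v : List Char) (s : Int) :
    posA c (u ++ v) s = posA c u s ++ posA c v (s + u.length) := by
  simp [posA, PySem.List.enumerate_append, List.filter_append]

-- every element of the was-dropped prefix fails p ≤ ·; every element of the suffix part passes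
theorem find?_posA_drop (c : Char) (b : List Char) (p : Nat) (hp : p ≤ b.length) :
    (posA c b 0).find? (fun x => decide ((p : Int) ≤ x)) =
      ((b.drop p).findIdx? (fun x => x == c)).map (fun j => (p : Int) + (j : Int)) := by
  have hsplit : b = b.take p ++ b.drop p := (List.take_append_drop p b).symm
  rw [show posA c b 0 = posA c (b.take p ++ b.drop p) 0 by rw [← hsplit]]
  rw [posA_append, List.find?_append]
  have h1 : (posA c (b.take p) 0).find? (fun x => decide ((p : Int) ≤ x)) = none := by
    rw [List.find?_eq_none]
    intro x hx
    have := mem_posA_bounds c (b.take p) 0 x hx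
    simp only [List.length_take] at this
    simp only [decide_eq_true_eq]
    omega
  have hlen : (0 : Int) + (b.take p).length = (p : Int) := by
    simp [List.length_take]; omega
  rw [h1, hlen]
  have h2 : ∀ x ∈ posA c (b.drop p) p, (decide ((p : Int) ≤ x)) = true := by
    intro x hx
    have := (mem_posA_bounds c (b.drop p) p x hx).1
    simpa using this
  have h3 : (posA c (b.drop p) p).find? (fun x => decide ((p : Int) ≤ x)) =
      (posA c (b.drop p) p).head? := by
    cases hl : posA c (b.drop p) p with
    | nil => simp
    | cons y ys =>
      have := h2 y (by rw [hl]; exact List.mem_cons_self)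
      simp [List.find?_cons, this]
  rw [Option.none_or, h3, head?_posA]

-- generic: a fold whose every step fixes the state st is the identity
theorem foldl_fixed_mem {α β : Type} (f : β → α → β) (st : β) (l : List α)
    (h : ∀ x ∈ l, f st x = st) : l.foldl f st = st := by
  induction l with
  | nil => rfl
  | cons x xs ih =>
    simp only [List.foldl_cons, h x List.mem_cons_self]
    exact ih (fun y hy => h y (List.mem_cons_of_mem x hy))

-- binary-search invariant: with a monotone split at t, bsLoop homes in on t
theorem bsLoop_inv (lst : List Int) (p : Int) (t : Nat)
    (hsplit : ∀ k (hk : k < lst.length), (lst[k] < p ↔ k < t)) :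
    ∀ n lo hi, hi - lo ≤ n → lo ≤ t → t ≤ hi → hi ≤ lst.length → bsLoop lst p lo hi = t := by
  intro n
  induction n with
  | zero =>
    intro lo hi h1 h2 h3 h4
    rw [bsLoop]
    have hno : ¬ lo < hi := by omega
    simp only [hno, if_false]
    omega
  | succ n ih =>
    intro lo hi h1 h2 h3 h4
    rw [bsLoop]
    by_cases hlh : lo < hi
    · simp only [hlh, if_true]
      have hmid1 : lo ≤ (lo + hi) / 2 := by omega
      have hmid2 : (lo + hi) / 2 < hi := by omega
      have hmlen : (lo + hi) / 2 < lst.length := by omega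
      rw [List.getD_eq_getElem lst 0 hmlen]
      by_cases hc : lst[(lo + hi) / 2] < p
      · have hlt := (hsplit _ hmlen).1 hc
        simp only [hc, if_true]
        exact ih _ _ (by omega) (by omega) h3 h4
      · have hmt : t ≤ (lo + hi) / 2 := by
          by_contra h
          push_neg at h
          exact hc ((hsplit _ hmlen).2 h)
        simp only [hc, if_false]
        exact ih _ _ (by omega) h2 hmt (by omega)
    · simp only [hlh, if_false]
      omega

theorem bsLoop_eq_findIdx (lst : List Int) (p : Int) (hsort : lst.Pairwise (· < ·)) :
    bsLoop lst p 0 lst.length = lst.findIdx (fun x => decide (p ≤ x)) := by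
  have htle : lst.findIdx (fun x => decide (p ≤ x)) ≤ lst.length := List.findIdx_le_length
  have hget : ∀ (i j : Nat) (hi : i < lst.length) (hj : j < lst.length), i < j → lst[i] < lst[j] :=
    fun i j hi hj hij => List.pairwise_iff_getElem.1 hsort i j hi hj hij
  have hsplit : ∀ k (hk : k < lst.length),
      (lst[k] < p ↔ k < lst.findIdx (fun x => decide (p ≤ x))) := by
    intro k hk
    constructor
    · intro hkp
      by_contra hkt
      push_neg at hkt
      have htl : lst.findIdx (fun x => decide (p ≤ x)) < lst.length := Nat.lt_of_le_of_lt hkt hk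
      have hpt : p ≤ lst[lst.findIdx (fun x => decide (p ≤ x))] := by
        have := List.findIdx_getElem (p := fun x => decide (p ≤ x)) (xs := lst) (w := htl)
        simpa using this
      rcases Nat.eq_or_lt_of_le hkt with h | h
      · simp only [h] at hpt
        omega
      · have := hget _ k htl hk h
        omega
    · intro hkt
      have hnp : ¬ p ≤ lst[k] := by simpa using List.not_of_lt_findIdx hkt
      omega
  exact bsLoop_inv lst p _ hsplit lst.length 0 lst.length (by omega) (by omega) htle (by omega)

-- the dictionary B builds stores, for each character, its positions in b in increasing order
theorem getD_pos_dict (b : List Char) (c : Char) :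
    ((PySem.List.enumerate b 0).foldl
        (fun d ic => d.modify ic.2 [] (fun l => l ++ [ic.1]))
        (PySem.Dict.empty : PySem.Dict Char (List Int))).getD c [] = posA c b 0 := by
  have hmap : (PySem.List.enumerate b 0).foldl
      (fun d ic => d.modify ic.2 [] (fun l => l ++ [ic.1]))
      (PySem.Dict.empty : PySem.Dict Char (List Int))
      = ((PySem.List.enumerate b 0).map Prod.swap).foldl
      (fun d p => d.modify p.1 [] (fun l => l ++ [p.2])) PySem.Dict.empty := by
    rw [List.foldl_map]
    simp
  rw [hmap, PySem.Dict.getD_foldl_modify_append]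
  rw [List.filter_map, List.map_map]
  simp only [pysem, List.nil_append]
  unfold posA
  congr 1

-- the char-level view of A's outer loop body (stringa[i] already fetched as c)
def innerCore (c : Char) (t : List String × String × Bool) (j : Int) : List String × String × Bool :=
  if t.2.2 then t
  else
    match PySem.Str.pyGet? t.2.1 j with
    | some cb =>
        if c = cb then (t.1 ++ [String.singleton c], PySem.Str.slice t.2.1 (some j) none, true)
        else t
    | none => t

def CA (c : Char) (st : List String × String) : List String × String :=
  let inner := (PySem.List.pyRange 0 (PySem.Str.len st.2) 1).foldl (innerCore c) (st.1, st.2, false)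
  (inner.1, inner.2.1)

theorem outer_eq_CA (a : String) (i : Int) (c : Char)
    (h : PySem.Str.pyGet? a i = some c) (st : List String × String) :
    compare_strings_outer a st i = CA c st := by
  unfold compare_strings_outer CA
  have hfun : compare_strings_inner a i = innerCore c := by
    funext t j
    unfold compare_strings_inner innerCore
    rw [h]
    cases PySem.Str.pyGet? t.2.1 j <;> rfl
  rw [hfun]

theorem Afold_range (a : String) :
    ∀ (n k : Nat), a.toList.length - k ≤ n → ∀ (st : List String × String),
      (PySem.List.pyRange (k : Int) (a.toList.length : Int) 1).foldl (compare_strings_outer a) st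
        = (a.toList.drop k).foldl (fun st c => CA c st) st := by
  intro n
  induction n with
  | zero =>
    intro k hk st
    rw [PySem.List.pyRange_one_eq_nil (by omega), List.drop_eq_nil_of_le (by omega)]
    rfl
  | succ n ih =>
    intro k hk st
    by_cases hlt : k < a.toList.length
    · rw [PySem.List.pyRange_one_cons (by exact_mod_cast hlt), List.drop_eq_getElem_cons hlt]
      simp only [List.foldl_cons]
      have hget : PySem.Str.pyGet? a (k : Int) = some (a.toList[k]'hlt) := by
        simp [PySem.List.pyGet?_natCast, List.getElem?_eq_getElem hlt]
      rw [outer_eq_CA a (k : Int) _ hget st]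
      rw [show ((k : Int) + 1) = ((k + 1 : Nat) : Int) by push_cast; ring]
      exact ih (k + 1) (by omega) _
    · rw [PySem.List.pyRange_one_eq_nil (by exact_mod_cast (by omega : a.toList.length ≤ k)),
        List.drop_eq_nil_of_le (by omega)]
      rfl

-- A's inner loop finds the first occurrence of c in the current b (or leaves everything alone)
theorem inner_eq (c : Char) (acc : List String) (s : String) :
    (PySem.List.pyRange 0 (PySem.Str.len s) 1).foldl (innerCore c) (acc, s, false) =
      match s.toList.findIdx? (fun x => x == c) with
      | none => (acc, s, false)
      | some t => (acc ++ [String.singleton c], PySem.Str.slice s (some (t : Int)) none, true) := by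
  have hlen : PySem.Str.len s = (s.toList.length : Int) := PySem.Str.len_eq s
  have hstep_nomatch : ∀ (j : Int), 0 ≤ j → (hj : j.toNat < s.toList.length) →
      (s.toList[j.toNat] == c) = false → innerCore c (acc, s, false) j = (acc, s, false) := by
    intro j hj0 hj hne
    unfold innerCore
    have : PySem.Str.pyGet? s j = some (s.toList[j.toNat]'hj) := by
      simp only [PySem.Str.pyGet?_eq, PySem.Chars.pyGet?_eq_listPyGet?]
      rw [PySem.List.pyGet?_of_nonneg _ hj0]
      exact List.getElem?_eq_getElem hj
    rw [this]
    simp only []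
    have hcc : ¬ c = s.toList[j.toNat] := by
      intro he
      rw [← he] at hne
      simp at hne
    simp [hcc]
  cases hf : s.toList.findIdx? (fun x => x == c) with
  | none =>
    have hall := List.findIdx?_eq_none_iff.1 hf
    apply foldl_fixed_mem
    intro j hj
    rw [PySem.List.mem_pyRange_one] at hj
    obtain ⟨hj0, hjl⟩ := hj
    have hjn : j.toNat < s.toList.length := by omega
    exact hstep_nomatch j hj0 hjn (hall _ (List.getElem_mem hjn))
  | some t =>
    obtain ⟨ht, hqt, hbefore⟩ := List.findIdx?_eq_some_iff_getElem.1 hf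
    rw [hlen, PySem.List.pyRange_one_append 0 (t : Int) _ (by omega) (by exact_mod_cast Nat.le_of_lt ht),
      List.foldl_append]
    have h1 : (PySem.List.pyRange 0 (t : Int) 1).foldl (innerCore c) (acc, s, false) = (acc, s, false) := by
      apply foldl_fixed_mem
      intro j hj
      rw [PySem.List.mem_pyRange_one] at hj
      obtain ⟨hj0, hjl⟩ := hj
      have hjt : j.toNat < t := by omega
      have hjn : j.toNat < s.toList.length := by omega
      refine hstep_nomatch j hj0 hjn ?_
      have := hbefore j.toNat hjt
      simpa using this
    rw [h1, PySem.List.pyRange_one_cons (by exact_mod_cast ht), List.foldl_cons]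
    have hstept : innerCore c (acc, s, false) (t : Int) =
        (acc ++ [String.singleton c], PySem.Str.slice s (some (t : Int)) none, true) := by
      unfold innerCore
      have hg : PySem.Str.pyGet? s (t : Int) = some (s.toList[t]'ht) := by
        simp only [PySem.Str.pyGet?_eq, PySem.Chars.pyGet?_eq_listPyGet?, PySem.List.pyGet?_natCast]
        exact List.getElem?_eq_getElem ht
      rw [hg]
      have hc : c = s.toList[t]'ht := by
        have h2 := hqt
        simp only [beq_iff_eq] at h2
        exact h2.symm
      simp [← hc]
    rw [hstept]
    apply foldl_fixed_mem
    intro j hj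
    rfl

-- A's outer loop, viewed per character, computes gspec
theorem Afold (b : List Char) (cs : List Char) :
    ∀ (acc : List String) (p : Nat) (s : String), s.toList = b.drop p →
      (cs.foldl (fun st c => CA c st) (acc, s)).1 = acc ++ gspec b cs p := by
  induction cs with
  | nil => intro acc p s _; simp [gspec]
  | cons c cs ih =>
    intro acc p s hs
    rw [List.foldl_cons]
    have hCA := inner_eq c acc s
    cases hf : (b.drop p).findIdx? (fun x => x == c) with
    | none =>
      rw [← hs] at hf
      have hstep : CA c (acc, s) = (acc, s) := by
        simp only [CA]
        rw [hCA, hf]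
      rw [hstep, ih acc p s hs]
      simp [gspec, hs ▸ hf]
    | some j =>
      rw [← hs] at hf
      have hstep : CA c (acc, s) =
          (acc ++ [String.singleton c], PySem.Str.slice s (some (j : Int)) none) := by
        simp only [CA]
        rw [hCA, hf]
      rw [hstep]
      have hs' : (PySem.Str.slice s (some (j : Int)) none).toList = b.drop (p + j) := by
        rw [PySem.Str.toList_slice, PySem.Chars.slice_eq_listSlice, PySem.List.slice_from_natCast,
          hs, List.drop_drop]
      rw [ih (acc ++ [String.singleton c]) (p + j) _ hs']
      have hg : gspec b (c :: cs) p = String.singleton c :: gspec b cs (p + j) := by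
        rw [gspec]
        rw [show ((b.drop p).findIdx? (fun x => x == c)) = some j from hs ▸ hf]
      rw [hg, List.append_assoc]
      rfl

-- B's loop over a, with the position table and binary search, also computes gspec
theorem Bfold (b : List Char) (pos : PySem.Dict Char (List Int))
    (hpos : ∀ c, pos.getD c [] = posA c b 0) (cs : List Char) :
    ∀ (acc : List String) (p : Nat), p ≤ b.length →
      (cs.foldl (compare_strings_alt_step pos) (acc, (p : Int))).1 = acc ++ gspec b cs p := by
  induction cs with
  | nil => intro acc p _; simp [gspec]
  | cons c cs ih =>
    intro acc p hp
    rw [List.foldl_cons]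
    have hfind := find?_posA_drop c b p hp
    cases hf : (b.drop p).findIdx? (fun x => x == c) with
    | none =>
      rw [hf] at hfind
      replace hfind : (posA c b 0).find? (fun x => decide ((p : Int) ≤ x)) = none := by
        rw [hfind]; simp
      rw [List.find?_eq_getElem?_findIdx] at hfind
      have hge : ¬ ((posA c b 0).findIdx (fun x => decide ((p : Int) ≤ x)) < (posA c b 0).length) := by
        intro hlt
        rw [List.getElem?_eq_getElem hlt] at hfind
        simp at hfind
      have hstep : compare_strings_alt_step pos (acc, (p : Int)) c = (acc, (p : Int)) := by
        simp only [compare_strings_alt_step]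
        rw [hpos c, bsLoop_eq_findIdx _ _ (pairwise_posA c b 0)]
        simp only [hge, if_false]
      rw [hstep, ih acc p hp]
      simp [gspec, hf]
    | some j =>
      rw [hf] at hfind
      replace hfind : (posA c b 0).find? (fun x => decide ((p : Int) ≤ x)) = some ((p : Int) + (j : Int)) := by
        rw [hfind]; simp
      rw [List.find?_eq_getElem?_findIdx] at hfind
      have hlt : (posA c b 0).findIdx (fun x => decide ((p : Int) ≤ x)) < (posA c b 0).length := by
        by_contra hge
        rw [List.getElem?_eq_none_iff.2 (by omega)] at hfind
        simp at hfind
      rw [List.getElem?_eq_getElem hlt] at hfind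
      have hval : (posA c b 0)[(posA c b 0).findIdx (fun x => decide ((p : Int) ≤ x))]'hlt
          = (p : Int) + (j : Int) := Option.some.inj hfind
      have hj : j < (b.drop p).length := by
        obtain ⟨h1, _, _⟩ := List.findIdx?_eq_some_iff_getElem.1 hf
        exact h1
      have hstep : compare_strings_alt_step pos (acc, (p : Int)) c =
          (acc ++ [String.singleton c], ((p + j : Nat) : Int)) := by
        simp only [compare_strings_alt_step]
        rw [hpos c, bsLoop_eq_findIdx _ _ (pairwise_posA c b 0)]
        simp only [hlt, if_true]
        rw [List.getD_eq_getElem _ 0 hlt, hval]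
        rw [show ((p : Int) + (j : Int)) = ((p + j : Nat) : Int) by push_cast; ring]
      rw [hstep]
      rw [ih (acc ++ [String.singleton c]) (p + j) (by simp at hj; omega)]
      have hg : gspec b (c :: cs) p = String.singleton c :: gspec b cs (p + j) := by
        rw [gspec, hf]
      rw [hg, List.append_assoc]
      rfl

theorem A_eq_gspec (stringa stringb : String) :
    compare_strings stringa stringb = gspec stringb.toList stringa.toList 0 := by
  unfold compare_strings
  simp only [PySem.Str.len_eq]
  rw [show (0 : Int) = ((0 : Nat) : Int) from by norm_num]
  rw [Afold_range stringa stringa.toList.length 0 (by omega) ([], stringb)]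
  rw [List.drop_zero]
  exact Afold stringb.toList stringa.toList [] 0 stringb (by simp)

theorem B_eq_gspec (stringa stringb : String) :
    compare_strings_alt stringa stringb = gspec stringb.toList stringa.toList 0 := by
  unfold compare_strings_alt
  rw [show (0 : Int) = ((0 : Nat) : Int) from by norm_num]
  exact Bfold stringb.toList _ (getD_pos_dict stringb.toList) stringa.toList [] 0 (by omega)

-- ===== VERDICT (by name: the statement is the Claim_ definition above) =====
theorem compare_strings_spec : Claim_equal_compare_strings := by
  intro stringa stringb _
  unfold Spec_compare_strings
  rw [A_eq_gspec, B_eq_gspec]
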